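-- pv_equiv track=rewrite | github.com/ww2d2vjh8c-lab/cognithor | src/jarvis/mcp/docker_tools.py | _is_blocked_mount
-- ===== SOURCE A (Python) =====
-- _BLOCKED_MOUNT_PATHS_UNIX = frozenset(
--     {
--         "/etc",
--         "/var",
--         "/usr",
--         "/bin",
--         "/sbin",
--         "/lib",
--         "/lib64",
--         "/boot",
--         "/proc",
--         "/sys",
--         "/dev",
--         "/root",
--     }
-- )
--
-- _BLOCKED_MOUNT_PATHS_WIN = frozenset(
--     {
--         "c:\\windows",
--         "c:\\program files",
--         "c:\\program files (x86)",
--         "c:\\programdata",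
--         "c:\\system volume information",
--     }
-- )
--
-- def _is_blocked_mount(path_str: str) -> bool:
--     """Prueft ob ein Pfad ein blockiertes System-Verzeichnis ist."""
--     normalized = path_str.replace("\\", "/").rstrip("/").lower()
--     # Unix-Pfade
--     for blocked in _BLOCKED_MOUNT_PATHS_UNIX:
--         if normalized == blocked or normalized.startswith(blocked + "/"):
--             return True
--     # Windows-Pfade
--     for blocked in _BLOCKED_MOUNT_PATHS_WIN:
--         blocked_norm = blocked.replace("\\", "/").lower()
--         if normalized == blocked_norm or normalized.startswith(blocked_norm + "/"):
--             return True
--     return False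
-- ===== SOURCE B (Python) =====
-- _BLOCKED_NORM = frozenset(
--     {
--         "/etc",
--         "/var",
--         "/usr",
--         "/bin",
--         "/sbin",
--         "/lib",
--         "/lib64",
--         "/boot",
--         "/proc",
--         "/sys",
--         "/dev",
--         "/root",
--         "c:/windows",
--         "c:/program files",
--         "c:/program files (x86)",
--         "c:/programdata",
--         "c:/system volume information",
--     }
-- )
--
--
-- def _is_blocked_mount(path_str: str) -> bool:
--     """Prueft ob ein Pfad ein blockiertes System-Verzeichnis ist."""
--     normalized = path_str.replace("\\", "/").rstrip("/").lower()
--     if normalized in _BLOCKED_NORM: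
--         return True
--     return any(c == "/" and normalized[:i] in _BLOCKED_NORM
--                for i, c in enumerate(normalized))
-- ===== Notes on version B (the rewrite author's own statement) =====
-- stated objective: alternative
-- what changed: Instead of scanning the two blocked lists and testing equality/startswith per entry, B precomputes one frozenset of all normalized blocked prefixes and walks the normalized path's own separator boundaries, testing each ancestor prefix with a set lookup.
import Mathlib
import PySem

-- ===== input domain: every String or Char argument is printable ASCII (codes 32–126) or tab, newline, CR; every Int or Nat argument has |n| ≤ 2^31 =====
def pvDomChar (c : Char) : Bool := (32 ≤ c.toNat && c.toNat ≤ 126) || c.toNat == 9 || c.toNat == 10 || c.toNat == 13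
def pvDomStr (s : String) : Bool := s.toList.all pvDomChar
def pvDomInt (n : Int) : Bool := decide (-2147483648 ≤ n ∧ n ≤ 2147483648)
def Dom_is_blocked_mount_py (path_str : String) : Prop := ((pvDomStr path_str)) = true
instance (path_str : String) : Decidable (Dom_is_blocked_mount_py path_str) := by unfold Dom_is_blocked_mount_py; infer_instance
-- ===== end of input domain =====

-- B replaces A's two startswith-scans over the blocked lists by one precomputed set of
-- normalized blocked prefixes and a single walk over the path's own '/'-boundaries (objective: alternative).

-- ===== PORT A =====
-- s.rstrip("/") ported by hand (PySem has no rstrip-with-chars): drop trailing '/' characters.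
-- Exact for the single strip character '/'.
def pvRstripSlash (cs : List Char) : List Char :=
  (cs.reverse.dropWhile (fun c => c == '/')).reverse

def pvBlockedUnix : List (List Char) :=
  ["/etc".toList, "/var".toList, "/usr".toList, "/bin".toList, "/sbin".toList,
   "/lib".toList, "/lib64".toList, "/boot".toList, "/proc".toList, "/sys".toList,
   "/dev".toList, "/root".toList]

def pvBlockedWin : List (List Char) :=
  ["c:\\windows".toList, "c:\\program files".toList, "c:\\program files (x86)".toList,
   "c:\\programdata".toList, "c:\\system volume information".toList]

def is_blocked_mount_py (path_str : String) : Bool :=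
  let normalized := PySem.Chars.lower (pvRstripSlash (PySem.Chars.replace path_str.toList ['\\'] ['/']))
  (pvBlockedUnix.any (fun blocked =>
      normalized == blocked || PySem.Chars.startswith normalized (blocked ++ ['/'])))
  ||
  (pvBlockedWin.any (fun blocked =>
      let blocked_norm := PySem.Chars.lower (PySem.Chars.replace blocked ['\\'] ['/'])
      normalized == blocked_norm || PySem.Chars.startswith normalized (blocked_norm ++ ['/'])))

-- ===== PORT B =====
def pvBlockedNorm : PySem.Set (List Char) :=
  PySem.Set.ofList
    ["/etc".toList, "/var".toList, "/usr".toList, "/bin".toList, "/sbin".toList,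
     "/lib".toList, "/lib64".toList, "/boot".toList, "/proc".toList, "/sys".toList,
     "/dev".toList, "/root".toList,
     "c:/windows".toList, "c:/program files".toList, "c:/program files (x86)".toList,
     "c:/programdata".toList, "c:/system volume information".toList]

def is_blocked_mount_py_alt (path_str : String) : Bool :=
  let normalized := PySem.Chars.lower (pvRstripSlash (PySem.Chars.replace path_str.toList ['\\'] ['/']))
  if PySem.Set.contains pvBlockedNorm normalized then true
  else (PySem.List.enumerate normalized).any (fun ic =>
    ic.2 == '/' && PySem.Set.contains pvBlockedNorm (PySem.Chars.slice normalized none (some ic.1)))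

-- ===== PRECONDITION & SPEC =====
def Spec_is_blocked_mount_py (path_str : String) (out : Bool) : Prop := out = is_blocked_mount_py_alt path_str
instance (path_str : String) (out : Bool) : Decidable (Spec_is_blocked_mount_py path_str out) := by unfold Spec_is_blocked_mount_py; infer_instance

-- ===== CLAIM (what is proved, stated in full; the proofs are below) =====
def Claim_equal_is_blocked_mount_py : Prop := ∀ (path_str : String), Dom_is_blocked_mount_py path_str → Spec_is_blocked_mount_py path_str (is_blocked_mount_py path_str)

-- ===== LEMMAS AND PROOFS =====

-- the combined normalized blocked list (what pvBlockedNorm evaluates to)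
def pvL17 : List (List Char) :=
  ["/etc".toList, "/var".toList, "/usr".toList, "/bin".toList, "/sbin".toList,
   "/lib".toList, "/lib64".toList, "/boot".toList, "/proc".toList, "/sys".toList,
   "/dev".toList, "/root".toList,
   "c:/windows".toList, "c:/program files".toList, "c:/program files (x86)".toList,
   "c:/programdata".toList, "c:/system volume information".toList]

-- a '<word>/' prefix of n is exactly a '/'-boundary cut of n
lemma pv_prefix_snoc_iff (b n : List Char) (c : Char) :
    b ++ [c] <+: n ↔ ∃ i, ∃ h : i < n.length, n[i] = c ∧ n.take i = b := by
  constructor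
  · rintro ⟨t, rfl⟩
    refine ⟨b.length, ?_, ?_, ?_⟩ <;> simp
  · rintro ⟨i, h, hc, rfl⟩
    refine ⟨n.drop (i + 1), ?_⟩
    rw [List.append_assoc, ← hc, List.singleton_append, ← List.drop_eq_getElem_cons h, List.take_append_drop]

-- membership of some blocked b with 'n = b or b/ prefixes n' = n itself blocked or an ancestor cut at a '/' blocked
lemma pv_bridge (L : List (List Char)) (n : List Char) :
    (∃ b ∈ L, n = b ∨ b ++ ['/'] <+: n) ↔
      n ∈ L ∨ ∃ i, ∃ h : i < n.length, n[i] = '/' ∧ n.take i ∈ L := by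
  constructor
  · rintro ⟨b, hb, rfl | hp⟩
    · exact Or.inl hb
    · obtain ⟨i, h, hc, ht⟩ := (pv_prefix_snoc_iff b n '/').mp hp
      exact Or.inr ⟨i, h, hc, ht ▸ hb⟩
  · rintro (h | ⟨i, h, hc, hm⟩)
    · exact ⟨n, h, Or.inl rfl⟩
    · exact ⟨n.take i, hm, Or.inr ((pv_prefix_snoc_iff _ n '/').mpr ⟨i, h, hc, rfl⟩)⟩

lemma pv_core (n : List Char) :
    ((pvBlockedUnix.any (fun blocked =>
        n == blocked || PySem.Chars.startswith n (blocked ++ ['/'])))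
     ||
     (pvBlockedWin.any (fun blocked =>
        let blocked_norm := PySem.Chars.lower (PySem.Chars.replace blocked ['\\'] ['/'])
        n == blocked_norm || PySem.Chars.startswith n (blocked_norm ++ ['/']))))
    =
    (if PySem.Set.contains pvBlockedNorm n then true
     else (PySem.List.enumerate n).any (fun ic =>
       ic.2 == '/' && PySem.Set.contains pvBlockedNorm (PySem.Chars.slice n none (some ic.1)))) := by
  have hwin : (pvBlockedWin.any (fun blocked =>
        let blocked_norm := PySem.Chars.lower (PySem.Chars.replace blocked ['\\'] ['/'])
        n == blocked_norm || PySem.Chars.startswith n (blocked_norm ++ ['/'])))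
      = ((pvBlockedWin.map (fun b => PySem.Chars.lower (PySem.Chars.replace b ['\\'] ['/']))).any
          (fun b => n == b || PySem.Chars.startswith n (b ++ ['/']))) := by
    rw [List.any_map]; rfl
  have happ : pvBlockedUnix ++ pvBlockedWin.map (fun b => PySem.Chars.lower (PySem.Chars.replace b ['\\'] ['/'])) = pvL17 := by decide
  have hS : pvBlockedNorm = pvL17 := by decide
  rw [hwin, ← List.any_append, happ, hS, Bool.eq_iff_iff]
  simp only [List.any_eq_true, Bool.or_eq_true, beq_iff_eq, PySem.Chars.startswith_iff,
    Bool.if_true_left, PySem.Set.contains_eq_listContains, List.contains_iff_mem, decide_eq_true_eq,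
    PySem.List.mem_enumerate_iff, PySem.Chars.slice_eq_listSlice, Bool.and_eq_true]
  rw [pv_bridge]
  constructor
  · rintro (h | ⟨i, h, hc, hm⟩)
    · exact Or.inl h
    · refine Or.inr ⟨(i, n[i]), ⟨i, h, by simp⟩, by simpa using hc, ?_⟩
      rw [PySem.List.slice_to n (by positivity)]
      simpa using hm
  · rintro (h | ⟨⟨j, c⟩, ⟨k, hk, hpair⟩, hc, hm⟩)
    · exact Or.inl h
    · obtain ⟨rfl, rfl⟩ : j = (k : Int) ∧ c = n[k] := by
        injection hpair with h1 h2; exact ⟨by omega, h2⟩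
      refine Or.inr ⟨k, hk, by simpa using hc, ?_⟩
      rw [PySem.List.slice_to n (by positivity)] at hm
      simpa using hm

-- ===== VERDICT (by name: the statement is the Claim_ definition above) =====
theorem is_blocked_mount_py_spec : Claim_equal_is_blocked_mount_py := by
  intro path_str _
  unfold Spec_is_blocked_mount_py is_blocked_mount_py is_blocked_mount_py_alt
  exact pv_core _
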